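-- pv_equiv track=rewrite | github.com/razzaksr/Nitte-Mine-July2025 | day9/MinSubBDivideArrayViaQueue.py | minSumByAndSubarrays
-- ===== SOURCE A (Python) =====
-- from collections import deque
--
-- def minSumByAndSubarrays(nums, andValues):
--       n,m = len(nums), len(andValues)
--       index = 0
--       que = deque()
--       for target in andValues:
--             found = False
--             value = nums[index]
--             for sub in range(index,n):
--                   value &= nums[sub]
--                   if value == target:
--                       que.append(nums[sub])
--                       index = sub+1
--                       found=True
--                       break
--             if not found: return -1
--       return sum(que)
-- ===== SOURCE B (Python) =====
-- BITS = 33  # inputs are 32-bit-bounded ints (|x| <= 2**31): bits 0..32 determine the value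
--
-- def minSumByAndSubarrays(nums, andValues):
--     n = len(nums)
--     # next-zero table, built back to front: nz[i][b] = first k >= i with bit b of
--     # nums[k] clear (0 <= i <= n; n if no such k).
--     rev = [[n] * BITS]
--     for i in range(n - 1, -1, -1):
--         prev = rev[-1]
--         rev.append([i if (nums[i] >> b) & 1 == 0 else prev[b] for b in range(BITS)])
--     nz = rev[::-1]
--     total = 0
--     i = 0
--     for t in andValues:
--         # ends j with AND(nums[i..j]) == t form the interval [lo, hi):
--         # every bit absent from t must already be cleared (j >= its next zero),
--         # every bit of t must not be cleared yet (j < its next zero).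
--         row = nz[i]
--         lo, hi = i, n
--         for b in range(BITS):
--             if (t >> b) & 1:
--                 hi = min(hi, row[b])
--             else:
--                 lo = max(lo, row[b])
--         if lo >= hi:
--             return -1
--         total += nums[lo]
--         i = lo + 1
--     return total
-- ===== Notes on version B (the rewrite author's own statement) =====
-- stated objective: alternative
-- what changed: B replaces A's element-by-element running-AND scan by a precomputed per-bit next-zero table: for each target the set of valid subarray ends is computed directly as an interval (max of next-zeros of the target's absent bits vs min over its present bits) and the greedy end is read off without scanning.
-- crash fix: A raises IndexError when the greedy scan has consumed all of nums while targets remain (e.g. nums=[1], andValues=[1,1]); B returns -1 there, the natural 'impossible' answer. — e.g. on minSumByAndSubarrays([1], [1, 1]): A raises IndexError, B returns -1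
import Mathlib
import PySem

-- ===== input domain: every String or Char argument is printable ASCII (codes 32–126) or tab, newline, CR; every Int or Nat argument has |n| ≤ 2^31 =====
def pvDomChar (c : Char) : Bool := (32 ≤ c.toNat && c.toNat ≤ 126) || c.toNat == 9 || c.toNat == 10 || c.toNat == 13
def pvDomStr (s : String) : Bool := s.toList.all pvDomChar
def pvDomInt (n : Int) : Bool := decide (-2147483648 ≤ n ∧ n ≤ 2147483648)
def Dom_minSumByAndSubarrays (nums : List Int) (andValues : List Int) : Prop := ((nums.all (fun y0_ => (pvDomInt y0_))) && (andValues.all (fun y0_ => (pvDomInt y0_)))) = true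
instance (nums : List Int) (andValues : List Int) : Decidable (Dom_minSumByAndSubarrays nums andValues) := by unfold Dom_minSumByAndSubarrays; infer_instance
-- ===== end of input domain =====

-- B replaces A's running-AND scan by a per-bit next-zero table from which each target's
-- matching subarray end is read off as an interval intersection (exact on the 32-bit-bounded domain Dom).

-- ===== PORT A =====
-- inner 'for sub in range(index, n): value &= nums[sub]; if value == target: break'
def pvA_scan (nums : List Int) (target : Int) : Int → List Int → Option (Int × Int)
  | _, [] => none
  | value, sub :: rest =>
      let v := PySem.Int.band value (PySem.List.pyGetD nums sub 0)
      if v = target then some (PySem.List.pyGetD nums sub 0, sub + 1)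
      else pvA_scan nums target v rest

-- outer 'for target in andValues' carrying (index, que); none = the 'return -1' path
def pvA_outer (nums : List Int) (n : Int) : List Int → Int → List Int → Option (List Int)
  | [], _, que => some que
  | target :: ts, index, que =>
      let value := PySem.List.pyGetD nums index 0   -- Python raises IndexError when index is out of range; Pre_ excludes that
      match pvA_scan nums target value (PySem.List.pyRange index n 1) with
      | none => none
      | some (x, newIdx) => pvA_outer nums n ts newIdx (que ++ [x])

def minSumByAndSubarrays (nums : List Int) (andValues : List Int) : Int :=
  match pvA_outer nums nums.length andValues 0 [] with
  | none => -1
  | some que => que.sum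

-- ===== PORT B =====
-- '[i if (nums[i] >> b) & 1 == 0 else prev[b] for b in range(BITS)]'
-- (Python's '>>' on int is Lean's '>>>' with a Nat shift; b ranges over 0..32, so b.toNat is exact)
def pvB_row (nums : List Int) (i : Int) (prev : List Int) : List Int :=
  (PySem.List.pyRange 0 33 1).map
    (fun b => if PySem.Int.band (PySem.List.pyGetD nums i 0 >>> b.toNat) 1 = 0
              then i else PySem.List.pyGetD prev b 0)

-- 'for i in range(n-1, -1, -1): prev = rev[-1]; rev.append([...])'
def pvB_build (nums : List Int) (n : Int) : List (List Int) :=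
  (PySem.List.pyRange (n - 1) (-1) (-1)).foldl
    (fun rev i => rev ++ [pvB_row nums i (PySem.List.pyGetD rev (-1) [])])
    [List.replicate 33 n]

-- 'for b in range(BITS): if (t >> b) & 1: hi = min(hi, row[b]) else: lo = max(lo, row[b])'
def pvB_lohi (t : Int) (row : List Int) (i n : Int) : Int × Int :=
  (PySem.List.pyRange 0 33 1).foldl
    (fun p b => if PySem.Int.band (t >>> b.toNat) 1 ≠ 0
                then (p.1, min p.2 (PySem.List.pyGetD row b 0))
                else (max p.1 (PySem.List.pyGetD row b 0), p.2))
    (i, n)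

-- 'for t in andValues' carrying (i, total); 'return -1' when the interval is empty
def pvB_outer (nums : List Int) (nz : List (List Int)) (n : Int) : List Int → Int → Int → Int
  | [], _, total => total
  | t :: ts, i, total =>
      let row := PySem.List.pyGetD nz i []
      let lh := pvB_lohi t row i n
      if lh.1 ≥ lh.2 then -1
      else pvB_outer nums nz n ts (lh.1 + 1) (total + PySem.List.pyGetD nums lh.1 0)

def minSumByAndSubarrays_alt (nums : List Int) (andValues : List Int) : Int :=
  let n : Int := nums.length
  let nz := (pvB_build nums n).reverse   -- 'nz = rev[::-1]' (PySem.List.slice?_none_none_neg_one: [::-1] is reverse)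
  pvB_outer nums nz n andValues 0 0

-- ===== PRECONDITION & SPEC =====
-- A raises IndexError exactly when the greedy scan consumes all of nums while targets remain;
-- that raising set has no description other than one greedy pass, so Pre_ performs exactly one
-- (it never computes either program's output, only whether nums is exhausted early).
def pvPreScan (t : Int) : Int → List Int → Option (List Int)
  | _, [] => none
  | acc, x :: xs =>
      let v := PySem.Int.band acc x
      if v = t then some xs else pvPreScan t v xs

def pvNoRaise : List Int → List Int → Bool
  | _, [] => true
  | [], _ :: _ => false
  | x :: xs, t :: ts =>
      match pvPreScan t (-1) (x :: xs) with
      | none => true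
      | some rest => pvNoRaise rest ts

def Pre_minSumByAndSubarrays (nums : List Int) (andValues : List Int) : Prop :=
  pvNoRaise nums andValues = true
instance (nums : List Int) (andValues : List Int) : Decidable (Pre_minSumByAndSubarrays nums andValues) := by
  unfold Pre_minSumByAndSubarrays; infer_instance
def pvWitness_minSumByAndSubarrays : List Int × List Int := ([5, 3, 7], [1, 7])

-- A raises IndexError when the greedy scan has consumed all of nums while targets remain; B returns -1 there.
def Raises_minSumByAndSubarrays (nums : List Int) (andValues : List Int) : Prop :=
  pvNoRaise nums andValues = false
instance (nums : List Int) (andValues : List Int) : Decidable (Raises_minSumByAndSubarrays nums andValues) := by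
  unfold Raises_minSumByAndSubarrays; infer_instance
def pvRaiseWitness_minSumByAndSubarrays : List Int × List Int := ([1], [1, 1])
def pvRaiseWitnessOut_minSumByAndSubarrays : Int := -1

def Spec_minSumByAndSubarrays (nums : List Int) (andValues : List Int) (out : Int) : Prop := out = minSumByAndSubarrays_alt nums andValues
instance (nums : List Int) (andValues : List Int) (out : Int) : Decidable (Spec_minSumByAndSubarrays nums andValues out) := by unfold Spec_minSumByAndSubarrays; infer_instance

-- ===== CLAIM (what is proved, stated in full; the proofs are below) =====
def Claim_equal_minSumByAndSubarrays : Prop := ∀ (nums : List Int) (andValues : List Int), Dom_minSumByAndSubarrays nums andValues → Pre_minSumByAndSubarrays nums andValues → Spec_minSumByAndSubarrays nums andValues (minSumByAndSubarrays nums andValues)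
def Claim_raises_minSumByAndSubarrays : Prop := (∀ (nums : List Int) (andValues : List Int), Dom_minSumByAndSubarrays nums andValues → Raises_minSumByAndSubarrays nums andValues → ¬ Pre_minSumByAndSubarrays nums andValues) ∧ (Dom_minSumByAndSubarrays (pvRaiseWitness_minSumByAndSubarrays.1) (pvRaiseWitness_minSumByAndSubarrays.2) ∧ Raises_minSumByAndSubarrays (pvRaiseWitness_minSumByAndSubarrays.1) (pvRaiseWitness_minSumByAndSubarrays.2) ∧ minSumByAndSubarrays_alt (pvRaiseWitness_minSumByAndSubarrays.1) (pvRaiseWitness_minSumByAndSubarrays.2) = pvRaiseWitnessOut_minSumByAndSubarrays)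

-- ===== LEMMAS AND PROOFS =====

-- ---- generic bit-level facts ----
theorem pv_and_add_ldiff (m : Nat) : ∀ n : Nat, (m &&& n) + Nat.ldiff m n = m := by
  induction m using Nat.strong_induction_on with
  | _ m ih =>
    intro n
    rcases Nat.eq_zero_or_pos m with hm | hm
    · subst hm; simp [Nat.ldiff, Nat.bitwise_zero_left]
    · have h2 : m / 2 < m := Nat.div_lt_self hm (by omega)
      have hrec := ih (m / 2) h2 (n / 2)
      have hAdiv : (m &&& n) / 2 = (m / 2) &&& (n / 2) := Nat.and_div_two
      have hLdiv : Nat.ldiff m n / 2 = Nat.ldiff (m / 2) (n / 2) := by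
        have := @Nat.bitwise_div_two_pow (fun a b => a && !b) m n 1 (by simp)
        simpa [Nat.ldiff] using this
      have hAm : (m &&& n) % 2 + Nat.ldiff m n % 2 = m % 2 := by
        have h1 : (m &&& n).testBit 0 = (m.testBit 0 && n.testBit 0) := Nat.testBit_and m n 0
        have h2' : (Nat.ldiff m n).testBit 0 = (m.testBit 0 && !n.testBit 0) := Nat.testBit_ldiff m n 0
        simp only [Nat.testBit_zero] at h1 h2'
        rcases Nat.mod_two_eq_zero_or_one m with hm2 | hm2 <;>
        rcases Nat.mod_two_eq_zero_or_one n with hn2 | hn2 <;>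
        rcases Nat.mod_two_eq_zero_or_one (m &&& n) with ha2 | ha2 <;>
        rcases Nat.mod_two_eq_zero_or_one (Nat.ldiff m n) with hl2 | hl2 <;>
        simp [hm2, hn2, ha2, hl2] at h1 h2' ⊢
      omega

theorem pv_sub_and_eq_ldiff (m n : Nat) : m - (m &&& n) = Nat.ldiff m n := by
  have := pv_and_add_ldiff m n; omega

theorem pv_band_eq_land (a b : Int) : PySem.Int.band a b = Int.land a b := by
  unfold PySem.Int.band Int.land
  rcases a with a | a <;> rcases b with b | b
  · simp
  · simp only [Int.negSucc_eq, Int.ofNat_eq_natCast]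
    rw [if_pos (by omega), if_neg (by omega)]
    have h1 : ((a : Int)).toNat = a := by omega
    have h2 : (- -((b : Int) + 1) - 1).toNat = b := by omega
    rw [h1, h2, pv_sub_and_eq_ldiff]
  · simp only [Int.negSucc_eq, Int.ofNat_eq_natCast]
    rw [if_neg (by omega), if_pos (by omega)]
    have h1 : ((b : Int)).toNat = b := by omega
    have h2 : (- -((a : Int) + 1) - 1).toNat = a := by omega
    rw [h1, h2, pv_sub_and_eq_ldiff]
  · simp only [Int.negSucc_eq]
    rw [if_neg (by omega), if_neg (by omega)]
    have h1 : (- -((a : Int) + 1) - 1).toNat = a := by omega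
    have h2 : (- -((b : Int) + 1) - 1).toNat = b := by omega
    rw [h1, h2]; omega

theorem pv_testBit_band (a b : Int) (k : Nat) :
    (PySem.Int.band a b).testBit k = (a.testBit k && b.testBit k) := by
  rw [pv_band_eq_land]; exact Int.testBit_land a b k

-- the port's bit test '(x >> b) & 1' reads exactly testBit
theorem pv_band_shift_one (x : Int) (b : Nat) :
    PySem.Int.band (x >>> b) 1 = if x.testBit b then 1 else 0 := by
  rcases x with m | m
  · have hs : (Int.ofNat m) >>> b = ((m >>> b : Nat) : Int) := rfl
    have h1 : ((1 : Int)) = ((1 : Nat) : Int) := rfl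
    have ht : (Int.ofNat m).testBit b = m.testBit b := rfl
    rw [hs, h1, PySem.Int.band_natCast, ht, Nat.and_one_is_mod,
        Nat.testBit_eq_decide_div_mod_eq, Nat.shiftRight_eq_div_pow]
    rcases Nat.mod_two_eq_zero_or_one (m / 2 ^ b) with h | h <;> simp [h]
  · have hs : (Int.negSucc m) >>> b = Int.negSucc (m >>> b) := rfl
    have ht : (Int.negSucc m).testBit b = !m.testBit b := rfl
    have hm : PySem.Int.mod (Int.negSucc (m >>> b)) 2 = (Int.negSucc (m >>> b)) % 2 :=
      PySem.Int.mod_eq_emod_of_pos (a := Int.negSucc (m >>> b)) (b := 2) (by omega)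
    rw [hs, PySem.Int.band_one, hm, ht, Nat.testBit_eq_decide_div_mod_eq,
        Int.negSucc_eq, Nat.shiftRight_eq_div_pow]
    have hc : ((m : Int)) / 2 ^ b = ((m / 2 ^ b : Nat) : Int) := by
      norm_cast
    rcases Nat.mod_two_eq_zero_or_one (m / 2 ^ b) with h | h <;> simp [h] <;> rw [hc] <;> omega

-- a 32-bit-bounded int is constant on bits ≥ 32
theorem pv_testBit_high (x : Int) (h1 : -2147483648 ≤ x) (h2 : x ≤ 2147483648)
    (b : Nat) (hb : 32 ≤ b) : x.testBit b = x.testBit 32 := by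
  have hpow : (2147483648 : Nat) < 2 ^ 32 := by norm_num
  have hmono : (2 : Nat) ^ 32 ≤ 2 ^ b := Nat.pow_le_pow_right (by omega) hb
  rcases x with m | m
  · have hm : m < 2 ^ 32 := by
      have h3 : ((m : Int)) ≤ 2147483648 := h2
      omega
    rw [show (Int.ofNat m).testBit b = m.testBit b from rfl,
        show (Int.ofNat m).testBit 32 = m.testBit 32 from rfl,
        Nat.testBit_lt_two_pow (by omega), Nat.testBit_lt_two_pow hm]
  · have hm : m < 2 ^ 32 := by
      have : -2147483648 ≤ (Int.negSucc m) := h1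
      rw [Int.negSucc_eq] at this
      omega
    rw [show (Int.negSucc m).testBit b = !m.testBit b from rfl,
        show (Int.negSucc m).testBit 32 = !m.testBit 32 from rfl,
        Nat.testBit_lt_two_pow (by omega), Nat.testBit_lt_two_pow hm]

theorem pv_int_ext (x y : Int) (h : ∀ b, x.testBit b = y.testBit b) : x = y := by
  rcases x with m | m <;> rcases y with k | k
  · have : m = k := Nat.eq_of_testBit_eq (fun b => h b)
    rw [this]
  · exfalso
    have hb := h (m + k + 1)
    have hm : m < 2 ^ (m + k + 1) := by
      calc m < 2 ^ m := Nat.lt_two_pow_self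
      _ ≤ 2 ^ (m + k + 1) := Nat.pow_le_pow_right (by omega) (by omega)
    have hk : k < 2 ^ (m + k + 1) := by
      calc k < 2 ^ k := Nat.lt_two_pow_self
      _ ≤ 2 ^ (m + k + 1) := Nat.pow_le_pow_right (by omega) (by omega)
    rw [show (Int.ofNat m).testBit (m+k+1) = m.testBit (m+k+1) from rfl,
        show (Int.negSucc k).testBit (m+k+1) = !k.testBit (m+k+1) from rfl,
        Nat.testBit_lt_two_pow hm, Nat.testBit_lt_two_pow hk] at hb
    simp at hb
  · exfalso
    have hb := h (m + k + 1)
    have hm : m < 2 ^ (m + k + 1) := by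
      calc m < 2 ^ m := Nat.lt_two_pow_self
      _ ≤ 2 ^ (m + k + 1) := Nat.pow_le_pow_right (by omega) (by omega)
    have hk : k < 2 ^ (m + k + 1) := by
      calc k < 2 ^ k := Nat.lt_two_pow_self
      _ ≤ 2 ^ (m + k + 1) := Nat.pow_le_pow_right (by omega) (by omega)
    rw [show (Int.negSucc m).testBit (m+k+1) = !m.testBit (m+k+1) from rfl,
        show (Int.ofNat k).testBit (m+k+1) = k.testBit (m+k+1) from rfl,
        Nat.testBit_lt_two_pow hm, Nat.testBit_lt_two_pow hk] at hb
    simp at hb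
  · have : m = k := Nat.eq_of_testBit_eq (fun b => by
      have hb := h b
      rw [show (Int.negSucc m).testBit b = !m.testBit b from rfl,
          show (Int.negSucc k).testBit b = !k.testBit b from rfl] at hb
      exact Bool.not_inj hb)
    rw [this]

-- ---- specification-side functions ----
-- first position k ≥ i with bit b of nums[k] clear (nums.length if none)
def pvFz (nums : List Int) (b : Nat) (i : Nat) : Nat :=
  if h : i < nums.length then
    (if (nums.getD i 0).testBit b then pvFz nums b (i + 1) else i)
  else nums.length
  termination_by nums.length - i

-- A's running AND value at scan position j, started at i0
def pvRun (nums : List Int) (i0 : Nat) : Nat → Int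
  | 0 => nums.getD i0 0
  | j + 1 => if j + 1 ≤ i0 then nums.getD i0 0
             else PySem.Int.band (pvRun nums i0 j) (nums.getD (j + 1) 0)

-- first j in [i, n) with pvRun i0 j = t (the position A's scan breaks at)
def pvFm (nums : List Int) (t : Int) (i0 : Nat) (j : Nat) : Option Nat :=
  if h : j < nums.length then
    (if pvRun nums i0 j = t then some j else pvFm nums t i0 (j + 1))
  else none
  termination_by nums.length - j

def pvBnd (x : Int) : Prop := -2147483648 ≤ x ∧ x ≤ 2147483648


theorem pvFz_ge (nums : List Int) (b i : Nat) (hi : i ≤ nums.length) : i ≤ pvFz nums b i := by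
  fun_induction pvFz with
  | case1 i h hbit ih => have := ih (by omega); omega
  | case2 i h hbit => omega
  | case3 i h => omega

theorem pvFz_le (nums : List Int) (b i : Nat) : pvFz nums b i ≤ nums.length := by
  fun_induction pvFz with
  | case1 i h hbit ih => omega
  | case2 i h hbit => omega
  | case3 i h => omega

theorem pvFz_true (nums : List Int) (b i : Nat) :
    ∀ k, i ≤ k → k < pvFz nums b i → (nums.getD k 0).testBit b = true := by
  fun_induction pvFz with
  | case1 i h hbit ih =>
      intro k hk1 hk2
      rcases Nat.eq_or_lt_of_le hk1 with rfl | h'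
      · exact hbit
      · exact ih k h' hk2
  | case2 i h hbit => intro k hk1 hk2; omega
  | case3 i h =>
      intro k hk1 hk2
      exfalso
      have := pvFz_le nums b i
      omega

theorem pvFz_false (nums : List Int) (b i : Nat) (h : pvFz nums b i < nums.length) :
    (nums.getD (pvFz nums b i) 0).testBit b = false := by
  fun_induction pvFz with
  | case1 i h' hbit ih => exact ih h
  | case2 i h' hbit => simpa using hbit
  | case3 i h' => omega

theorem pvFz_gt_iff (nums : List Int) (b i j : Nat) (hj : j < nums.length) (hij : i ≤ j) :
    (j < pvFz nums b i) ↔ (∀ k, i ≤ k → k ≤ j → (nums.getD k 0).testBit b = true) := by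
  constructor
  · intro h k hk1 hk2
    exact pvFz_true nums b i k hk1 (by omega)
  · intro h
    by_contra hc
    push Not at hc
    have hlt : pvFz nums b i < nums.length := by omega
    have hge : i ≤ pvFz nums b i := pvFz_ge nums b i (by omega)
    have := h (pvFz nums b i) hge (by omega)
    rw [pvFz_false nums b i hlt] at this
    exact absurd this (by simp)

theorem pv_getD_bnd (nums : List Int) (hD : ∀ x ∈ nums, pvBnd x) (k : Nat) :
    pvBnd (nums.getD k 0) := by
  rcases Nat.lt_or_ge k nums.length with h | h
  · exact hD _ (by rw [List.getD_eq_getElem _ _ h]; exact List.getElem_mem h)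
  · rw [List.getD_eq_default _ _ h]; constructor <;> norm_num

theorem pvFz_high (nums : List Int) (hD : ∀ x ∈ nums, pvBnd x) (b : Nat) (hb : 32 ≤ b)
    (i : Nat) : pvFz nums b i = pvFz nums 32 i := by
  fun_induction pvFz nums b i with
  | case1 i h hbit ih =>
      have hB := pv_getD_bnd nums hD i
      have h32 : (nums.getD i 0).testBit 32 = true := by
        rw [← pv_testBit_high _ hB.1 hB.2 b hb]; exact hbit
      rw [ih]
      conv_rhs => rw [pvFz.eq_def]
      rw [dif_pos h, if_pos h32]
  | case2 i h hbit =>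
      have hB := pv_getD_bnd nums hD i
      have h32 : ¬ (nums.getD i 0).testBit 32 = true := by
        rw [← pv_testBit_high _ hB.1 hB.2 b hb]; exact hbit
      rw [pvFz.eq_def, dif_pos h, if_neg h32]
  | case3 i h => rw [pvFz.eq_def, dif_neg h]

theorem pvRun_testBit (nums : List Int) (i0 : Nat) (b : Nat) :
    ∀ j, i0 ≤ j → ((pvRun nums i0 j).testBit b = true ↔
      (∀ k, i0 ≤ k → k ≤ j → (nums.getD k 0).testBit b = true)) := by
  intro j
  induction j with
  | zero =>
      intro h
      have h0 : i0 = 0 := by omega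
      subst h0
      simp only [pvRun]
      constructor
      · intro hb k hk1 hk2
        have : k = 0 := by omega
        subst this; exact hb
      · intro hb; exact hb 0 (by omega) (by omega)
  | succ j ih =>
      intro h
      rcases Nat.eq_or_lt_of_le h with rfl | h'
      · rw [pvRun, if_pos (by omega)]
        constructor
        · intro hb k hk1 hk2
          have : k = j + 1 := by omega
          subst this; exact hb
        · intro hb; exact hb (j+1) (by omega) (by omega)
      · rw [pvRun, if_neg (by omega), pv_testBit_band]
        rw [Bool.and_eq_true]
        rw [ih (by omega)]
        constructor
        · rintro ⟨hall, hlast⟩ k hk1 hk2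
          rcases Nat.lt_or_ge k (j+1) with hk | hk
          · exact hall k hk1 (by omega)
          · have : k = j + 1 := by omega
            subst this; exact hlast
        · intro hall
          exact ⟨fun k hk1 hk2 => hall k hk1 (by omega), hall (j+1) (by omega) (by omega)⟩

theorem pvRun_testBit_decide (nums : List Int) (i0 j b : Nat) (hij : i0 ≤ j) (hj : j < nums.length) :
    (pvRun nums i0 j).testBit b = decide (j < pvFz nums b i0) := by
  have h1 := pvRun_testBit nums i0 b j hij
  have h2 := pvFz_gt_iff nums b i0 j hj hij
  rcases hb : (pvRun nums i0 j).testBit b with _ | _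
  · have : ¬ (j < pvFz nums b i0) := by
      intro hlt
      have := h2.mp hlt
      rw [← h1] at this
      simp [hb] at this
    simp [this]
  · have := h2.mpr (h1.mp hb)
    simp [this]

theorem pv_match_iff (nums : List Int) (t : Int) (hD : ∀ x ∈ nums, pvBnd x) (hT : pvBnd t)
    (i j : Nat) (hij : i ≤ j) (hj : j < nums.length) :
    pvRun nums i j = t ↔
      ∀ b, b < 33 → (t.testBit b = true → j < pvFz nums b i) ∧
                    (t.testBit b = false → pvFz nums b i ≤ j) := by
  constructor
  · intro he b _
    have hd := pvRun_testBit_decide nums i j b hij hj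
    rw [he] at hd
    constructor
    · intro hbt; rw [hbt] at hd; have := hd.symm; simpa using this
    · intro hbt; rw [hbt] at hd; have := hd.symm; simp at this; omega
  · intro hall
    apply pv_int_ext
    intro b
    rcases Nat.lt_or_ge b 33 with hb | hb
    · have hd := pvRun_testBit_decide nums i j b hij hj
      rcases hbt : t.testBit b with _ | _
      · have := (hall b hb).2 hbt
        rw [hd]; simp; omega
      · have := (hall b hb).1 hbt
        rw [hd]; simpa using this
    · have hb32 : (32 : Nat) ≤ b := by omega
      have hd := pvRun_testBit_decide nums i j b hij hj
      have hd32 := pvRun_testBit_decide nums i j 32 hij hj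
      rw [pvFz_high nums hD b hb32 i] at hd
      rw [pv_testBit_high t hT.1 hT.2 b hb32]
      rw [hd, ← hd32]
      -- bit 32 case: 32 < 33
      rcases hbt : t.testBit 32 with _ | _
      · have := (hall 32 (by omega)).2 hbt
        rw [hd32]; simp; omega
      · have := (hall 32 (by omega)).1 hbt
        rw [hd32]; simpa using this

theorem pvFm_none (nums : List Int) (t : Int) (i0 : Nat) :
    ∀ j, (∀ k, j ≤ k → k < nums.length → pvRun nums i0 k ≠ t) → pvFm nums t i0 j = none := by
  intro j
  fun_induction pvFm with
  | case1 j h heq =>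
      intro hno
      exact absurd heq (hno j (by omega) h)
  | case2 j h heq ih =>
      intro hno
      exact ih (fun k hk1 hk2 => hno k (by omega) hk2)
  | case3 j h => intro _; rfl

theorem pvFm_some (nums : List Int) (t : Int) (i0 : Nat) :
    ∀ j js, j ≤ js → js < nums.length → pvRun nums i0 js = t →
      (∀ k, j ≤ k → k < js → pvRun nums i0 k ≠ t) → pvFm nums t i0 j = some js := by
  intro j
  fun_induction pvFm with
  | case1 j h heq =>
      intro js h1 h2 h3 h4
      rcases Nat.eq_or_lt_of_le h1 with rfl | hlt
      · rfl
      · exact absurd heq (h4 j (by omega) hlt)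
  | case2 j h heq ih =>
      intro js h1 h2 h3 h4
      rcases Nat.eq_or_lt_of_le h1 with rfl | hlt
      · exact absurd h3 heq
      · exact ih js (by omega) h2 h3 (fun k hk1 hk2 => h4 k (by omega) hk2)
  | case3 j h =>
      intro js h1 h2 h3 h4
      omega

theorem pvA_scan_eq (nums : List Int) (t : Int) (i0 : Nat) :
    ∀ d j (acc : Int), nums.length - j ≤ d → i0 ≤ j →
      (∀ _ : j < nums.length, PySem.Int.band acc (nums.getD j 0) = pvRun nums i0 j) →
      pvA_scan nums t acc (PySem.List.pyRange (j : Int) (nums.length : Int) 1) =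
        (pvFm nums t i0 j).map (fun j' => (nums.getD j' 0, (j' : Int) + 1)) := by
  intro d
  induction d with
  | zero =>
      intro j acc hd hij hacc
      have hj : nums.length ≤ j := by omega
      rw [PySem.List.pyRange_one_eq_nil (by exact_mod_cast hj)]
      rw [pvFm.eq_def, dif_neg (by omega)]
      rfl
  | succ d ih =>
      intro j acc hd hij hacc
      rcases Nat.lt_or_ge j nums.length with hj | hj
      · rw [PySem.List.pyRange_one_cons (by exact_mod_cast hj)]
        show (if PySem.Int.band acc (PySem.List.pyGetD nums (j : Int) 0) = t then
                some (PySem.List.pyGetD nums (j : Int) 0, (j : Int) + 1)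
              else pvA_scan nums t (PySem.Int.band acc (PySem.List.pyGetD nums (j : Int) 0))
                     (PySem.List.pyRange ((j : Int) + 1) (nums.length : Int) 1)) = _
        rw [PySem.List.pyGetD_natCast]
        rw [hacc hj]
        rw [pvFm.eq_def, dif_pos hj]
        by_cases hm : pvRun nums i0 j = t
        · rw [if_pos hm, if_pos hm]
          simp
        · rw [if_neg hm, if_neg hm]
          have hcast : ((j : Int) + 1) = (((j + 1 : Nat)) : Int) := by push_cast; ring
          rw [hcast]
          apply ih (j + 1) _ (by omega) (by omega)
          intro hj1
          rw [pvRun, if_neg (by omega)]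
      · rw [PySem.List.pyRange_one_eq_nil (by exact_mod_cast hj)]
        rw [pvFm.eq_def, dif_neg (by omega)]
        rfl

def pvRowAt (nums : List Int) (i : Nat) : List Int :=
  (List.range 33).map (fun b => (pvFz nums b i : Int))

theorem pvRowAt_getD (nums : List Int) (i b : Nat) (hb : b < 33) :
    (pvRowAt nums i).getD b 0 = (pvFz nums b i : Int) := by
  unfold pvRowAt
  rw [List.getD_eq_getElem _ _ (by simpa using hb)]
  simp

theorem pvB_row_eq (nums : List Int) (k : Nat) (hk : k < nums.length) :
    pvB_row nums (k : Int) (pvRowAt nums (k + 1)) = pvRowAt nums k := by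
  unfold pvB_row
  rw [show ((33 : Int)) = ((33 : Nat) : Int) from rfl, PySem.List.pyRange_zero_nat]
  unfold pvRowAt
  rw [List.map_map]
  apply List.map_congr_left
  intro b hb
  rw [List.mem_range] at hb
  simp only [Function.comp_apply]
  rw [PySem.List.pyGetD_natCast nums, Int.toNat_natCast, Int.shiftRight_natCast_right,
      pv_band_shift_one]
  rw [PySem.List.pyGetD_natCast ((List.range 33).map (fun b => (pvFz nums b (k+1) : Int)))]
  rw [List.getD_eq_getElem ((List.range 33).map (fun b => (pvFz nums b (k+1) : Int))) 0
        (by simpa using hb)]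
  rw [List.getElem_map]
  conv_rhs => rw [pvFz.eq_def]
  rw [dif_pos hk]
  rcases hbit : (nums.getD k 0).testBit b with _ | _
  · rw [if_pos (by simp), if_neg (by simp)]
  · rw [if_neg (by simp), if_pos rfl]
    simp

def pvRevRows (nums : List Int) (k : Nat) : List (List Int) :=
  ((List.range' k (nums.length + 1 - k)).map (pvRowAt nums)).reverse

theorem pvBuild_inv (nums : List Int) :
    ∀ k, k ≤ nums.length →
      (PySem.List.pyRange ((k : Int) - 1) (-1) (-1)).foldl
        (fun rev i => rev ++ [pvB_row nums i (PySem.List.pyGetD rev (-1) [])])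
        (pvRevRows nums k) = pvRevRows nums 0 := by
  intro k
  induction k with
  | zero =>
      intro _
      rw [PySem.List.pyRange_neg_one_eq_nil (by omega)]
      rfl
  | succ k ih =>
      intro hk
      have hcast : ((k + 1 : Nat) : Int) - 1 = (k : Int) := by push_cast; ring
      rw [hcast, PySem.List.pyRange_neg_one_cons (by omega)]
      rw [List.foldl_cons]
      have hne : pvRevRows nums (k + 1) ≠ [] := by
        unfold pvRevRows
        simp
        omega
      have hlast : PySem.List.pyGetD (pvRevRows nums (k + 1)) (-1) [] = pvRowAt nums (k + 1) := by
        rw [PySem.List.pyGetD_neg_one _ _ hne]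
        unfold pvRevRows
        rw [List.getLast_reverse, List.head_eq_getElem, List.getElem_map, List.getElem_range']
      rw [hlast, pvB_row_eq nums k (by omega)]
      have hstep : pvRevRows nums (k + 1) ++ [pvRowAt nums k] = pvRevRows nums k := by
        unfold pvRevRows
        have hlen : nums.length + 1 - k = (nums.length - k) + 1 := by omega
        rw [hlen, List.range'_succ, List.map_cons, List.reverse_cons]
        have : nums.length + 1 - (k + 1) = nums.length - k := by omega
        rw [this]
      rw [hstep]
      exact ih (by omega)

theorem pvB_build_eq (nums : List Int) :
    (pvB_build nums (nums.length : Int)).reverse = (List.range (nums.length + 1)).map (pvRowAt nums) := by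
  unfold pvB_build
  have hinit : [List.replicate 33 ((nums.length : Int))] = pvRevRows nums nums.length := by
    unfold pvRevRows
    have h1 : nums.length + 1 - nums.length = 1 := by omega
    rw [h1, List.range'_one, List.map_singleton, List.reverse_singleton]
    congr 1
    symm
    rw [List.eq_replicate_iff]
    refine ⟨by simp [pvRowAt], ?_⟩
    intro x hx
    rw [pvRowAt, List.mem_map] at hx
    obtain ⟨b, _, hb⟩ := hx
    rw [← hb, pvFz.eq_def, dif_neg (by omega)]
  rw [hinit, pvBuild_inv nums nums.length (by omega)]
  unfold pvRevRows
  rw [List.reverse_reverse]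
  have h0 : nums.length + 1 - 0 = nums.length + 1 := by omega
  rw [h0, List.range_eq_range']

theorem pvLohi_aux (nums : List Int) (t : Int) (i : Nat) :
    ∀ (d : Nat) (a : Nat), 33 - a ≤ d → ∀ (p : Int × Int) (j : Int),
      (((PySem.List.pyRange (a : Int) 33 1).foldl
          (fun p b => if PySem.Int.band (t >>> b.toNat) 1 ≠ 0
                      then (p.1, min p.2 (PySem.List.pyGetD (pvRowAt nums i) b 0))
                      else (max p.1 (PySem.List.pyGetD (pvRowAt nums i) b 0), p.2)) p).1 ≤ j ∧
       j < ((PySem.List.pyRange (a : Int) 33 1).foldl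
          (fun p b => if PySem.Int.band (t >>> b.toNat) 1 ≠ 0
                      then (p.1, min p.2 (PySem.List.pyGetD (pvRowAt nums i) b 0))
                      else (max p.1 (PySem.List.pyGetD (pvRowAt nums i) b 0), p.2)) p).2) ↔
      (p.1 ≤ j ∧ j < p.2 ∧ ∀ b : Nat, a ≤ b → b < 33 →
        (t.testBit b = true → j < (pvFz nums b i : Int)) ∧
        (t.testBit b = false → (pvFz nums b i : Int) ≤ j)) := by
  intro d
  induction d with
  | zero =>
      intro a ha p j
      rw [PySem.List.pyRange_one_eq_nil (by exact_mod_cast (by omega : (33:Nat) ≤ a))]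
      simp only [List.foldl_nil]
      constructor
      · rintro ⟨h1, h2⟩
        exact ⟨h1, h2, fun b hb1 hb2 => by omega⟩
      · rintro ⟨h1, h2, _⟩
        exact ⟨h1, h2⟩
  | succ d ih =>
      intro a ha p j
      rcases Nat.lt_or_ge a 33 with hlt | hge
      · rw [PySem.List.pyRange_one_cons (by exact_mod_cast hlt)]
        rw [List.foldl_cons]
        rw [show ((a : Int)).toNat = a from Int.toNat_natCast a,
            Int.shiftRight_natCast_right, pv_band_shift_one,
            PySem.List.pyGetD_natCast (pvRowAt nums i), pvRowAt_getD nums i a hlt]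
        have hcast : ((a : Int)) + 1 = ((a + 1 : Nat) : Int) := by push_cast; ring
        rcases hbt : t.testBit a with _ | _
        · rw [if_neg (by simp)]
          rw [hcast, ih (a + 1) (by omega) (max p.1 (pvFz nums a i : Int), p.2) j]
          constructor
          · rintro ⟨h1, h2, h3⟩
            refine ⟨le_trans (le_max_left _ _) h1, h2, fun b hb1 hb2 => ?_⟩
            rcases Nat.eq_or_lt_of_le hb1 with rfl | hb'
            · refine ⟨fun hc => ?_, fun _ => le_trans (le_max_right _ _) h1⟩
              rw [hbt] at hc; cases hc
            · exact h3 b (by omega) hb2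
          · rintro ⟨h1, h2, h3⟩
            refine ⟨?_, h2, fun b hb1 hb2 => h3 b (by omega) hb2⟩
            exact max_le h1 ((h3 a (by omega) hlt).2 hbt)
        · rw [if_pos (by simp)]
          rw [hcast, ih (a + 1) (by omega) (p.1, min p.2 (pvFz nums a i : Int)) j]
          constructor
          · rintro ⟨h1, h2, h3⟩
            refine ⟨h1, lt_of_lt_of_le h2 (min_le_left _ _), fun b hb1 hb2 => ?_⟩
            rcases Nat.eq_or_lt_of_le hb1 with rfl | hb'
            · refine ⟨fun _ => lt_of_lt_of_le h2 (min_le_right _ _), fun hc => ?_⟩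
              rw [hbt] at hc; cases hc
            · exact h3 b (by omega) hb2
          · rintro ⟨h1, h2, h3⟩
            refine ⟨h1, ?_, fun b hb1 hb2 => h3 b (by omega) hb2⟩
            exact lt_min h2 ((h3 a (by omega) hlt).1 hbt)
      · rw [PySem.List.pyRange_one_eq_nil (by exact_mod_cast hge)]
        simp only [List.foldl_nil]
        constructor
        · rintro ⟨h1, h2⟩
          exact ⟨h1, h2, fun b hb1 hb2 => by omega⟩
        · rintro ⟨h1, h2, _⟩
          exact ⟨h1, h2⟩

theorem pvLohi_iff (nums : List Int) (t : Int) (i : Nat) (j : Int) :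
    ((pvB_lohi t (pvRowAt nums i) (i : Int) (nums.length : Int)).1 ≤ j ∧
      j < (pvB_lohi t (pvRowAt nums i) (i : Int) (nums.length : Int)).2) ↔
    ((i : Int) ≤ j ∧ j < (nums.length : Int) ∧ ∀ b : Nat, b < 33 →
        (t.testBit b = true → j < (pvFz nums b i : Int)) ∧
        (t.testBit b = false → (pvFz nums b i : Int) ≤ j)) := by
  unfold pvB_lohi
  have h := pvLohi_aux nums t i 33 0 (by omega) ((i : Int), (nums.length : Int)) j
  simp only [Nat.cast_zero] at h
  rw [h]
  constructor
  · rintro ⟨h1, h2, h3⟩; exact ⟨h1, h2, fun b hb => h3 b (by omega) hb⟩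
  · rintro ⟨h1, h2, h3⟩; exact ⟨h1, h2, fun b _ hb => h3 b hb⟩

theorem pvRun_self (nums : List Int) (i : Nat) : pvRun nums i i = nums.getD i 0 := by
  cases i with
  | zero => rfl
  | succ j => rw [pvRun, if_pos (by omega)]

theorem pvMatch_lohi (nums : List Int) (t : Int) (hD : ∀ x ∈ nums, pvBnd x) (hT : pvBnd t)
    (i k : Nat) (hik : i ≤ k) (hk : k < nums.length) :
    pvRun nums i k = t ↔
      ((pvB_lohi t (pvRowAt nums i) (i : Int) (nums.length : Int)).1 ≤ (k : Int) ∧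
       (k : Int) < (pvB_lohi t (pvRowAt nums i) (i : Int) (nums.length : Int)).2) := by
  rw [pv_match_iff nums t hD hT i k hik hk, pvLohi_iff nums t i (k : Int)]
  constructor
  · intro h
    refine ⟨by exact_mod_cast hik, by exact_mod_cast hk, fun b hb => ?_⟩
    refine ⟨fun hbt => by exact_mod_cast (h b hb).1 hbt, fun hbt => by exact_mod_cast (h b hb).2 hbt⟩
  · rintro ⟨_, _, h3⟩ b hb
    refine ⟨fun hbt => by exact_mod_cast (h3 b hb).1 hbt, fun hbt => by exact_mod_cast (h3 b hb).2 hbt⟩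

theorem pvFm_lohi (nums : List Int) (t : Int) (hD : ∀ x ∈ nums, pvBnd x) (hT : pvBnd t)
    (i : Nat) (_hin : i ≤ nums.length) :
    pvFm nums t i i =
      (if (pvB_lohi t (pvRowAt nums i) (i : Int) (nums.length : Int)).1 <
          (pvB_lohi t (pvRowAt nums i) (i : Int) (nums.length : Int)).2
       then some ((pvB_lohi t (pvRowAt nums i) (i : Int) (nums.length : Int)).1.toNat)
       else none) := by
  set lo := (pvB_lohi t (pvRowAt nums i) (i : Int) (nums.length : Int)).1 with hlo
  set hi := (pvB_lohi t (pvRowAt nums i) (i : Int) (nums.length : Int)).2 with hhi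
  by_cases hlt : lo < hi
  · rw [if_pos hlt]
    have hmem := (pvLohi_iff nums t i lo).mp ⟨le_refl lo, hlt⟩
    obtain ⟨hilo, hlon, _⟩ := hmem
    have hlo0 : (0 : Int) ≤ lo := le_trans (by exact_mod_cast Nat.zero_le i) hilo
    have hcast : ((lo.toNat : Nat) : Int) = lo := Int.toNat_of_nonneg hlo0
    apply pvFm_some
    · omega
    · omega
    · rw [pvMatch_lohi nums t hD hT i lo.toNat (by omega) (by omega), hcast]
      exact ⟨le_refl lo, hlt⟩
    · intro k hk1 hk2 hc
      rw [pvMatch_lohi nums t hD hT i k hk1 (by omega)] at hc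
      omega
  · rw [if_neg hlt]
    apply pvFm_none
    intro k hk1 hk2 hc
    rw [pvMatch_lohi nums t hD hT i k hk1 hk2] at hc
    omega

theorem pvOuter_eq (nums : List Int) (hD : ∀ x ∈ nums, pvBnd x) :
    ∀ (ts : List Int), (∀ t ∈ ts, pvBnd t) → ∀ (i : Nat), i ≤ nums.length → ∀ (que : List Int),
      (match pvA_outer nums (nums.length : Int) ts (i : Int) que with
       | none => (-1 : Int) | some q => q.sum) =
      pvB_outer nums ((pvB_build nums (nums.length : Int)).reverse) (nums.length : Int)
        ts (i : Int) que.sum := by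
  intro ts
  induction ts with
  | nil => intro _ i hi que; rfl
  | cons t ts ih =>
      intro hT i hi que
      have hTt : pvBnd t := hT t (by simp)
      have hTts : ∀ u ∈ ts, pvBnd u := fun u hu => hT u (by simp [hu])
      show (match (match pvA_scan nums t (PySem.List.pyGetD nums (i : Int) 0)
                    (PySem.List.pyRange (i : Int) (nums.length : Int) 1) with
                  | none => none
                  | some (x, newIdx) => pvA_outer nums (nums.length : Int) ts newIdx (que ++ [x])) with
             | none => (-1 : Int) | some q => q.sum) = _
      rw [PySem.List.pyGetD_natCast nums]
      rw [pvA_scan_eq nums t i (nums.length - i) i (nums.getD i 0) (by omega) (le_refl i)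
            (fun _ => by rw [PySem.Int.band_self, pvRun_self])]
      -- B side: the row read from the table is pvRowAt i
      have hrow : PySem.List.pyGetD ((pvB_build nums ((nums.length : Nat) : Int)).reverse) (i : Int) []
          = pvRowAt nums i := by
        rw [pvB_build_eq nums, PySem.List.pyGetD_natCast, List.getD_eq_getElem _ _ (by simp; omega),
            List.getElem_map, List.getElem_range]
      show _ = (if (pvB_lohi t (PySem.List.pyGetD ((pvB_build nums (nums.length : Int)).reverse) (i : Int) []) (i : Int) (nums.length : Int)).1 ≥
                   (pvB_lohi t _ (i : Int) (nums.length : Int)).2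
                then (-1 : Int)
                else pvB_outer nums ((pvB_build nums (nums.length : Int)).reverse) (nums.length : Int) ts
                      ((pvB_lohi t _ (i : Int) (nums.length : Int)).1 + 1)
                      (que.sum + PySem.List.pyGetD nums (pvB_lohi t _ (i : Int) (nums.length : Int)).1 0))
      rw [hrow]
      rw [pvFm_lohi nums t hD hTt i hi]
      set lo := (pvB_lohi t (pvRowAt nums i) (i : Int) (nums.length : Int)).1 with hlo
      set hi' := (pvB_lohi t (pvRowAt nums i) (i : Int) (nums.length : Int)).2 with hhi
      by_cases hlt : lo < hi'
      · rw [if_pos hlt, if_neg (by omega)]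
        have hmem := (pvLohi_iff nums t i lo).mp ⟨le_refl lo, hlt⟩
        obtain ⟨hilo, hlon, _⟩ := hmem
        have hlo0 : (0 : Int) ≤ lo := le_trans (by exact_mod_cast Nat.zero_le i) hilo
        have hcast : ((lo.toNat : Nat) : Int) = lo := Int.toNat_of_nonneg hlo0
        simp only [Option.map_some]
        have hrec := ih hTts (lo.toNat + 1) (by omega) (que ++ [nums.getD lo.toNat 0])
        rw [List.sum_append, List.sum_cons, List.sum_nil] at hrec
        have hc2 : ((lo.toNat + 1 : Nat) : Int) = lo + 1 := by omega
        rw [hc2] at hrec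
        rw [show ((lo.toNat : Nat) : Int) + 1 = lo + 1 from by omega]
        rw [hrec]
        congr 1
        rw [show PySem.List.pyGetD nums lo 0 = nums.getD lo.toNat 0 from by
              rw [← hcast, PySem.List.pyGetD_natCast, Int.toNat_natCast]]
        ring
      · rw [if_neg hlt, if_pos (by omega)]
        rfl

theorem pv_dom_unpack (nums andValues : List Int) (h : Dom_minSumByAndSubarrays nums andValues) :
    (∀ x ∈ nums, pvBnd x) ∧ (∀ t ∈ andValues, pvBnd t) := by
  unfold Dom_minSumByAndSubarrays at h
  rw [Bool.and_eq_true, List.all_eq_true, List.all_eq_true] at h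
  constructor
  · intro x hx
    have := h.1 x hx
    unfold pvDomInt at this
    exact ⟨(of_decide_eq_true this).1, (of_decide_eq_true this).2⟩
  · intro x hx
    have := h.2 x hx
    unfold pvDomInt at this
    exact ⟨(of_decide_eq_true this).1, (of_decide_eq_true this).2⟩

theorem pv_main (nums andValues : List Int) (hDom : Dom_minSumByAndSubarrays nums andValues) :
    minSumByAndSubarrays nums andValues = minSumByAndSubarrays_alt nums andValues := by
  obtain ⟨hD, hT⟩ := pv_dom_unpack nums andValues hDom
  unfold minSumByAndSubarrays minSumByAndSubarrays_alt
  have h := pvOuter_eq nums hD andValues hT 0 (by omega) []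
  simp only [Nat.cast_zero, List.sum_nil] at h
  exact h

-- ===== VERDICT (by name: the statement is the Claim_ definition above) =====
theorem minSumByAndSubarrays_spec : Claim_equal_minSumByAndSubarrays := by
  intro nums andValues hDom _
  unfold Spec_minSumByAndSubarrays
  exact pv_main nums andValues hDom


set_option maxRecDepth 8192 in
@[simp] theorem minSumByAndSubarrays_raises : Claim_raises_minSumByAndSubarrays := by
  unfold Claim_raises_minSumByAndSubarrays
  constructor
  · intro nums andValues _ hr hp
    unfold Raises_minSumByAndSubarrays at hr
    unfold Pre_minSumByAndSubarrays at hp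
    rw [hp] at hr
    simp at hr
  · exact ⟨by decide, by decide, by decide⟩
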